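-- pv_equiv track=rewrite | github.com/priyamayur/NamedEntityRecognition | ExtractData.py | get_NER_masked_positive_data
-- ===== SOURCE A (Python) =====
-- def get_NER_masked_positive_data(dataset, nerPosition):
--   training_data = []
--   masked_count = []
--   for ind_d, data in enumerate(dataset):
--     nerSent = nerPosition[ind_d]
--     for ner in nerSent:
--       complete_sentences = []
--       numberOfNer = ner[0]
--       wordPosition = ner[1]
--       for ind, word in enumerate(data):
--         if (ind >= wordPosition and ind < (wordPosition + numberOfNer)):
--           complete_sentences.append("<MASK>")
--         else:
--           complete_sentences.append(word[0])
--       training_data.append([complete_sentences,1])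
--   return training_data
-- ===== SOURCE B (Python) =====
-- def get_NER_masked_positive_data(dataset, nerPosition):
--   out = []
--   for data, ners in zip(dataset, nerPosition):
--     base = [w[0] for w in data]
--     n = len(base)
--     for k, wp in ners:
--       lo = min(max(wp, 0), n)
--       hi = max(min(wp + k, n), lo)
--       out.append([base[:lo] + ['<MASK>'] * (hi - lo) + base[hi:], 1])
--   return out
-- ===== Notes on version B (the rewrite author's own statement) =====
-- stated objective: simpler
-- what changed: B precomputes the base word list once per sentence and builds each masked example by clamped slice concatenation (prefix + '<MASK>'*len + suffix) instead of A's per-word index-range conditional inside a third nested loop; the dataset/span pairing uses zip instead of enumerate+index.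
import Mathlib
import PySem

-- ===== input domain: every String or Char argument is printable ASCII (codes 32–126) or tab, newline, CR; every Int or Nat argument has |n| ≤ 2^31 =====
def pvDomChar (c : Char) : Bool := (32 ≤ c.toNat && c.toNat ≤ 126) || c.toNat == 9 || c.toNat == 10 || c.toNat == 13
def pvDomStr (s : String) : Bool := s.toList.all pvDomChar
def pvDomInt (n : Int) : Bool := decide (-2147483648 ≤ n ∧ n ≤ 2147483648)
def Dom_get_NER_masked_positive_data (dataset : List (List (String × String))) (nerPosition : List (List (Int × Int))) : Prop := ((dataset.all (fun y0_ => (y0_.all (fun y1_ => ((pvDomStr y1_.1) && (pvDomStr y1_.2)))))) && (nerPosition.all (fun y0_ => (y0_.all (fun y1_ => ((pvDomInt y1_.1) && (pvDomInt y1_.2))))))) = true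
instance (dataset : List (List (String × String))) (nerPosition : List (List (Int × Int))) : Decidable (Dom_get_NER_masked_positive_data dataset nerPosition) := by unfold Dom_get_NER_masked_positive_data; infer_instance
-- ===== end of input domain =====

-- B builds each masked example by clamped slice concatenation over a precomputed base word
-- list (zip pairing), instead of A's per-word index-range conditional in a third nested loop.

-- ===== PORT A =====
def get_NER_masked_positive_data (dataset : List (List (String × String))) (nerPosition : List (List (Int × Int))) : List (List String × Int) :=
  (PySem.List.enumerate dataset 0).foldl (fun training_data p =>
    let ind_d := p.1
    let data := p.2
    -- nerPosition[ind_d]: Python raises IndexError when out of range; Pre_ excludes that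
    let nerSent := (PySem.List.pyGet? nerPosition ind_d).getD []
    nerSent.foldl (fun training_data ner =>
      let numberOfNer := ner.1
      let wordPosition := ner.2
      let complete_sentences := (PySem.List.enumerate data 0).foldl (fun cs q =>
        if q.1 ≥ wordPosition ∧ q.1 < wordPosition + numberOfNer then cs ++ ["<MASK>"]
        else cs ++ [q.2.1]) []
      training_data ++ [(complete_sentences, 1)]) training_data) []

-- ===== PORT B =====
def pvMaskSent (base : List String) (k wp : Int) : List String :=
  let n : Int := base.length
  let lo := min (max wp 0) n
  let hi := max (min (wp + k) n) lo
  base.take lo.toNat ++ List.replicate (hi - lo).toNat "<MASK>" ++ base.drop hi.toNat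

def get_NER_masked_positive_data_alt (dataset : List (List (String × String))) (nerPosition : List (List (Int × Int))) : List (List String × Int) :=
  (dataset.zip nerPosition).foldl (fun out p =>
    let base := p.1.map Prod.fst
    p.2.foldl (fun out ner => out ++ [(pvMaskSent base ner.1 ner.2, 1)]) out) []

-- ===== PRECONDITION & SPEC =====
-- Pre_ excludes exactly the inputs where A raises IndexError (nerPosition shorter than dataset).
def Pre_get_NER_masked_positive_data (dataset : List (List (String × String))) (nerPosition : List (List (Int × Int))) : Prop :=
  dataset.length ≤ nerPosition.length
instance (dataset : List (List (String × String))) (nerPosition : List (List (Int × Int))) : Decidable (Pre_get_NER_masked_positive_data dataset nerPosition) := by unfold Pre_get_NER_masked_positive_data; infer_instance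

def pvWitness_get_NER_masked_positive_data : (List (List (String × String))) × (List (List (Int × Int))) :=
  ([[("John", "PER"), ("runs", "O")]], [[(1, 0)]])

def Spec_get_NER_masked_positive_data (dataset : List (List (String × String))) (nerPosition : List (List (Int × Int))) (out : List (List String × Int)) : Prop := out = get_NER_masked_positive_data_alt dataset nerPosition
instance (dataset : List (List (String × String))) (nerPosition : List (List (Int × Int))) (out : List (List String × Int)) : Decidable (Spec_get_NER_masked_positive_data dataset nerPosition out) := by unfold Spec_get_NER_masked_positive_data; infer_instance

-- ===== CLAIM (what is proved, stated in full; the proofs are below) =====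
def Claim_equal_get_NER_masked_positive_data : Prop := ∀ (dataset : List (List (String × String))) (nerPosition : List (List (Int × Int))), Dom_get_NER_masked_positive_data dataset nerPosition → Pre_get_NER_masked_positive_data dataset nerPosition → Spec_get_NER_masked_positive_data dataset nerPosition (get_NER_masked_positive_data dataset nerPosition)

-- ===== LEMMAS AND PROOFS =====

-- Per-sentence: A's per-word conditional fold equals B's clamped slice concatenation.
theorem pvSent_eq (data : List (String × String)) (k wp : Int) :
    (PySem.List.enumerate data 0).foldl (fun cs q =>
        if q.1 ≥ wp ∧ q.1 < wp + k then cs ++ ["<MASK>"] else cs ++ [q.2.1]) []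
      = pvMaskSent (data.map Prod.fst) k wp := by
  have hfun : (fun (cs : List String) (q : Int × (String × String)) =>
      if q.1 ≥ wp ∧ q.1 < wp + k then cs ++ ["<MASK>"] else cs ++ [q.2.1])
      = fun cs q => cs ++ [if q.1 ≥ wp ∧ q.1 < wp + k then "<MASK>" else q.2.1] := by
    funext cs q; split_ifs <;> rfl
  rw [hfun, PySem.List.foldl_append_singleton_eq_map, List.nil_append]
  simp only [pvMaskSent, List.length_map]
  set n : Int := (data.length : Int) with hn
  set lo : Int := min (max wp 0) n with hlo
  set hi : Int := max (min (wp + k) n) lo with hhi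
  have hn0 : 0 ≤ n := by omega
  have h0 : 0 ≤ lo := by omega
  have hLH : lo ≤ hi := by omega
  have hHn : hi ≤ n := by omega
  apply List.ext_getElem
  · simp only [List.length_map, PySem.List.length_enumerate, List.length_append,
      List.length_take, List.length_replicate, List.length_drop]
    omega
  · intro i h1 h2
    simp only [List.length_map, PySem.List.length_enumerate] at h1
    simp only [List.getElem_map, PySem.List.getElem_enumerate, List.getElem_append,
      List.getElem_take, List.getElem_replicate, List.getElem_drop, List.length_append,
      List.length_take, List.length_replicate, List.length_map]
    by_cases hc : ((0 : Int) + (i : Int) ≥ wp ∧ (0 : Int) + (i : Int) < wp + k)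
    · have ha : lo.toNat ≤ i := by omega
      have hb : i < hi.toNat := by omega
      rw [if_pos hc, dif_pos (by omega), dif_neg (by omega)]
    · have hreg : i < lo.toNat ∨ hi.toNat ≤ i := by omega
      rw [if_neg hc]
      rcases hreg with hlt | hge
      · rw [dif_pos (by omega), dif_pos (by omega)]
      · rw [dif_neg (by omega)]
        have hidx : hi.toNat + (i - (min lo.toNat data.length + (hi - lo).toNat)) = i := by omega
        simp only [hidx]

-- Outer pairing: enumerate + index into (pre ++ ns) equals zip with ns, for any state G.
theorem pvOuter_eq {α : Type} (G : List α → List (String × String) → List (Int × Int) → List α) :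
    ∀ (ds : List (List (String × String))) (ns pre : List (List (Int × Int))) (acc : List α),
      ds.length ≤ ns.length →
      (PySem.List.enumerate ds (pre.length : Int)).foldl
        (fun td p => G td p.2 ((PySem.List.pyGet? (pre ++ ns) p.1).getD [])) acc
      = (ds.zip ns).foldl (fun td q => G td q.1 q.2) acc := by
  intro ds
  induction ds with
  | nil => intro ns pre acc _; rfl
  | cons d ds ih =>
    intro ns pre acc hlen
    cases ns with
    | nil => simp at hlen
    | cons n ns' =>
      rw [PySem.List.enumerate_cons, List.zip_cons_cons, List.foldl_cons, List.foldl_cons]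
      simp only [PySem.List.pyGet?_append_length, Option.getD_some]
      have h2 := ih ns' (pre ++ [n]) (G acc d n) (by simpa using hlen)
      simp only [List.length_append, List.length_singleton, List.append_assoc,
        List.singleton_append, Nat.cast_add, Nat.cast_one] at h2
      exact h2

-- ===== VERDICT (by name: the statement is the Claim_ definition above) =====
theorem get_NER_masked_positive_data_spec : Claim_equal_get_NER_masked_positive_data := by
  intro ds ns _ hpre
  unfold Spec_get_NER_masked_positive_data get_NER_masked_positive_data get_NER_masked_positive_data_alt
  have h := pvOuter_eq
    (fun td data ners => ners.foldl (fun td ner =>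
      td ++ [((PySem.List.enumerate data 0).foldl (fun cs q =>
        if q.1 ≥ ner.2 ∧ q.1 < ner.2 + ner.1 then cs ++ ["<MASK>"] else cs ++ [q.2.1]) [], (1 : Int))]) td)
    ds ns [] [] hpre
  simp only [List.nil_append, List.length_nil, Nat.cast_zero] at h
  exact h.trans (by
    congr 1
    funext td q
    congr 1
    funext td' ner
    rw [pvSent_eq])
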